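-- pv_equiv track=rewrite | github.com/wilmurillo-ai/Design-Assistant | .skills/openclaw-skills/skills/inf-lucas/content-alchemy/scripts/summarize_pdf_session.py | contiguous_completed_segments
-- ===== SOURCE A (Python) =====
-- def contiguous_completed_segments(completed_segments: list[int]) -> list[int]:
--     contiguous: list[int] = []
--     expected = 1
--     for segment in completed_segments:
--         if segment != expected:
--             break
--         contiguous.append(segment)
--         expected += 1
--     return contiguous
-- ===== SOURCE B (Python) =====
-- def contiguous_completed_segments(completed_segments: list[int]) -> list[int]:
--     # Self-similar recursion: a list starts with the canonical sequence 1,2,3,...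
--     # iff it starts with 1 and its shifted-down tail starts with 1,2,3,... again.
--     if not completed_segments or completed_segments[0] != 1:
--         return []
--     rest = contiguous_completed_segments([x - 1 for x in completed_segments[1:]])
--     return [1] + [x + 1 for x in rest]
-- ===== Notes on version B (the rewrite author's own statement) =====
-- stated objective: alternative
-- what changed: Replaces A's single-pass loop with an 'expected' counter by a self-similar recursion: the answer is empty unless the head is 1, otherwise 1 followed by the shifted-up answer for the shifted-down tail; no counter or index is maintained.
import Mathlib
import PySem

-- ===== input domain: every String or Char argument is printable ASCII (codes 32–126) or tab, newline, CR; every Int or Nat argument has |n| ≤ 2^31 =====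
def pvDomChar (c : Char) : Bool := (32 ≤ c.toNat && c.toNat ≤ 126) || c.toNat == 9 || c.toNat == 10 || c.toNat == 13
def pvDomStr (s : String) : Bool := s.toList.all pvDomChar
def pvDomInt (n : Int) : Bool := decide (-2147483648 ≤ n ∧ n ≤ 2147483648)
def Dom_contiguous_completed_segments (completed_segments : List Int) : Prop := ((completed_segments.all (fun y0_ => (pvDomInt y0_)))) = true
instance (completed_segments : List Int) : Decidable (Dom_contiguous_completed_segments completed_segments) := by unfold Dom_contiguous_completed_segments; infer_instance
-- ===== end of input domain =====

-- B replaces A's counter loop by a self-similar recursion on the shifted-down tail (objective: alternative).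
-- ===== PORT A =====
-- Loop of A: accumulate matching prefix while tracking 'expected'.
def pvLoopA : List Int → Int → List Int
  | [], _ => []
  | s :: t, expected => if s ≠ expected then [] else s :: pvLoopA t (expected + 1)

def contiguous_completed_segments (completed_segments : List Int) : List Int :=
  pvLoopA completed_segments 1

-- ===== PORT B =====
-- B: [] unless head = 1; else 1 :: (recurse on tail with every element decremented), incremented back.
def contiguous_completed_segments_alt (completed_segments : List Int) : List Int :=
  match completed_segments with
  | [] => []
  | x :: t =>
      if x ≠ 1 then []
      else 1 :: (contiguous_completed_segments_alt (t.map (· - 1))).map (· + 1)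
termination_by completed_segments.length
decreasing_by simp

-- ===== PRECONDITION & SPEC =====
def Spec_contiguous_completed_segments (completed_segments : List Int) (out : List Int) : Prop := out = contiguous_completed_segments_alt completed_segments
instance (completed_segments : List Int) (out : List Int) : Decidable (Spec_contiguous_completed_segments completed_segments out) := by unfold Spec_contiguous_completed_segments; infer_instance

-- ===== CLAIM (what is proved, stated in full; the proofs are below) =====
def Claim_equal_contiguous_completed_segments : Prop := ∀ (completed_segments : List Int), Dom_contiguous_completed_segments completed_segments → Spec_contiguous_completed_segments completed_segments (contiguous_completed_segments completed_segments)

-- ===== LEMMAS AND PROOFS =====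
-- Shifting every input element down by one shifts A's loop output down by one (with the counter shifted too).
theorem pvLoopA_shift : ∀ (xs : List Int) (e : Int),
    pvLoopA (xs.map (· - 1)) e = (pvLoopA xs (e + 1)).map (· - 1) := by
  intro xs
  induction xs with
  | nil => intro e; simp [pvLoopA]
  | cons v t ih =>
      intro e
      simp only [List.map_cons, pvLoopA]
      by_cases h : v = e + 1
      · rw [if_neg (by omega), if_neg (by simp [h]), ih (e + 1), List.map_cons]
      · rw [if_pos (by omega), if_pos (by simp [h]), List.map_nil]

theorem pvB_eq_loopA : ∀ (n : Nat) (xs : List Int), xs.length ≤ n →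
    contiguous_completed_segments_alt xs = pvLoopA xs 1 := by
  intro n
  induction n with
  | zero =>
      intro xs h
      have : xs = [] := List.eq_nil_of_length_eq_zero (Nat.le_zero.mp h)
      subst this; rw [contiguous_completed_segments_alt]; rfl
  | succ n ih =>
      intro xs h
      match xs with
      | [] => rw [contiguous_completed_segments_alt]; rfl
      | x :: t =>
          rw [contiguous_completed_segments_alt]
          simp only [pvLoopA]
          by_cases hx : x = 1
          · rw [if_neg (by simp [hx]), if_neg (by simp [hx])]
            have hlen : (t.map (· - 1)).length ≤ n := by
              simp at h ⊢; omega
            rw [ih _ hlen, pvLoopA_shift t 1, hx]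
            simp [Function.comp_def]
          · rw [if_pos (by simp [hx]), if_pos (by simp [hx])]

-- ===== VERDICT (by name: the statement is the Claim_ definition above) =====
theorem contiguous_completed_segments_spec : Claim_equal_contiguous_completed_segments := by
  intro xs _
  unfold Spec_contiguous_completed_segments contiguous_completed_segments
  exact (pvB_eq_loopA xs.length xs le_rfl).symm
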